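-- pv_equiv track=rewrite | github.com/sanogenetics/puretabix | puretabix/tabix.py | region_to_bins
-- ===== SOURCE A (Python) =====
-- from typing import Dict, Generator, Tuple, Union
--
-- def region_to_bins(
--     begin: int, end: int, n_levels: int = 5, min_shift: int = 14
-- ) -> Generator[int, None, None]:
--     """
--     generator of keys to bins of records which *may* overlap the given region
--
--     n_levels: int, optional
--         cluster level, 5 for tabix
--     min_shift: int, optional
--         minimum shift, 14 for tabix
--     """
--     t = 0
--     s = min_shift + (n_levels << 1) + n_levels
--     for level in range(n_levels + 1):
--         b = t + (begin >> s)
--         e = t + (end >> s)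
--         n = e - b + 1
--         for k in range(b, e + 1):
--             yield k
--             n += 1
--         t += 1 << ((level << 1) + level)
--         s -= 3
-- ===== SOURCE B (Python) =====
-- def region_to_bins(begin, end, n_levels=5, min_shift=14):
--     """
--     generator of keys to bins of records which *may* overlap the given region
--
--     Bottom-up: compute the finest-level bin range once from begin/end, then
--     derive each coarser level's range via the parent relation (b - 1) >> 3,
--     and emit the collected levels coarsest-first.
--     """
--     if n_levels < 0:
--         return
--     t = (8 ** n_levels - 1) // 7  # offset of the finest level
--     lo = t + (begin >> min_shift)
--     hi = t + (end >> min_shift)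
--     levels = []
--     for _ in range(n_levels + 1):
--         levels.append(range(lo, hi + 1))
--         lo = (lo - 1) >> 3
--         hi = (hi - 1) >> 3
--     for r in reversed(levels):
--         yield from r
-- ===== Notes on version B (the rewrite author's own statement) =====
-- stated objective: alternative
-- what changed: Instead of re-deriving every level's range by shifting begin/end with a running offset t and shift s, B computes only the finest-level bin range once and obtains each coarser level by the bin tree's parent relation (b-1)>>3, collecting levels bottom-up and emitting them reversed (coarsest first).
import Mathlib
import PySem

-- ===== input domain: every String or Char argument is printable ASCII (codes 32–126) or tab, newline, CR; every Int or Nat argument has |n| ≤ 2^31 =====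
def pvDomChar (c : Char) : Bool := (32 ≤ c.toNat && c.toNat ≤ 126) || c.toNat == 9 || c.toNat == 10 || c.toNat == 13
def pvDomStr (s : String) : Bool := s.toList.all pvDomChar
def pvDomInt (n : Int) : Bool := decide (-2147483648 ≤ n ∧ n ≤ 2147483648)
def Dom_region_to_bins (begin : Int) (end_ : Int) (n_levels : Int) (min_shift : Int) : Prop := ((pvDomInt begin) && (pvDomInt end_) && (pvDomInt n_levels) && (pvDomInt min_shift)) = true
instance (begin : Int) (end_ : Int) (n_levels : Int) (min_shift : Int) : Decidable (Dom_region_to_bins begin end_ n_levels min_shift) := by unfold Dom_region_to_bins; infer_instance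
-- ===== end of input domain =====

-- B replaces A's top-down per-level shifting of begin/end (running accumulators t, s) by a
-- bottom-up derivation: only the finest-level bin range is computed from begin/end, each
-- coarser level is obtained via the bin tree's parent relation (b-1)>>3, and the collected
-- levels are emitted reversed (coarsest first); objective: alternative.

-- ===== PORT A =====
-- state = (t, s, yielded-so-far); the inner generator loop also carries A's dead counter n
def region_to_bins (begin : Int) (end_ : Int) (n_levels : Int) (min_shift : Int) : List Int :=
  ((PySem.List.pyRange 0 (n_levels + 1)).foldl
    (fun st (level : Int) =>
      let b := st.1 + (begin >>> st.2.1.toNat)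
      let e := st.1 + (end_ >>> st.2.1.toNat)
      let n := e - b + 1
      let inner := (PySem.List.pyRange b (e + 1)).foldl
        (fun p k => (p.1 ++ [k], p.2 + 1)) (st.2.2, n)
      (st.1 + ((1:Int) <<< ((level <<< (1:Nat)) + level).toNat), st.2.1 - 3, inner.1))
    ((0, min_shift + (n_levels <<< (1:Nat)) + n_levels, []) : Int × Int × List Int)).2.2

-- ===== PORT B =====
-- state = (lo, hi, levels); each iteration appends the current level's range and moves
-- lo/hi to the parent bins ((x-1) >> 3); the collected levels are emitted reversed
def region_to_bins_alt (begin : Int) (end_ : Int) (n_levels : Int) (min_shift : Int) : List Int :=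
  if n_levels < 0 then []
  else
    let t := PySem.Int.floordiv (8 ^ n_levels.toNat - 1) 7
    let lo := t + (begin >>> min_shift.toNat)
    let hi := t + (end_ >>> min_shift.toNat)
    let st := (PySem.List.pyRange 0 (n_levels + 1)).foldl
      (fun (st : Int × Int × List (List Int)) _ =>
        ((st.1 - 1) >>> (3:Nat), (st.2.1 - 1) >>> (3:Nat),
          st.2.2 ++ [PySem.List.pyRange st.1 (st.2.1 + 1)]))
      (lo, hi, [])
    st.2.2.reverse.flatMap id

-- ===== PRECONDITION & SPEC =====
-- Pre_ excludes exactly the inputs where Python A raises ValueError ('negative shift count'):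
-- with 0 ≤ n_levels some level shifts by s = min_shift + 3*(n_levels - level) < 0 iff min_shift < 0.
def Pre_region_to_bins (begin : Int) (end_ : Int) (n_levels : Int) (min_shift : Int) : Prop :=
  n_levels < 0 ∨ 0 ≤ min_shift
instance (begin : Int) (end_ : Int) (n_levels : Int) (min_shift : Int) : Decidable (Pre_region_to_bins begin end_ n_levels min_shift) := by unfold Pre_region_to_bins; infer_instance
def pvWitness_region_to_bins : Int × Int × Int × Int := (5, 123456, 5, 14)

def Spec_region_to_bins (begin : Int) (end_ : Int) (n_levels : Int) (min_shift : Int) (out : List Int) : Prop := out = region_to_bins_alt begin end_ n_levels min_shift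
instance (begin : Int) (end_ : Int) (n_levels : Int) (min_shift : Int) (out : List Int) : Decidable (Spec_region_to_bins begin end_ n_levels min_shift out) := by unfold Spec_region_to_bins; infer_instance

-- ===== CLAIM (what is proved, stated in full; the proofs are below) =====
def Claim_equal_region_to_bins : Prop := ∀ (begin : Int) (end_ : Int) (n_levels : Int) (min_shift : Int), Dom_region_to_bins begin end_ n_levels min_shift → Pre_region_to_bins begin end_ n_levels min_shift → Spec_region_to_bins begin end_ n_levels min_shift (region_to_bins begin end_ n_levels min_shift)

-- ===== LEMMAS AND PROOFS =====

-- pvG m = 8^0 + … + 8^(m-1) = A's accumulator t on entering level m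
def pvG : Nat → Int
  | 0 => 0
  | m + 1 => pvG m + 8 ^ m

lemma pvG_seven (m : Nat) : (7:Int) * pvG m = 8 ^ m - 1 := by
  induction m with
  | zero => simp [pvG]
  | succ m ih => simp only [pvG, pow_succ]; linarith

lemma pvG_eq_floordiv (m : Nat) : pvG m = PySem.Int.floordiv ((8:Int) ^ m - 1) 7 := by
  rw [PySem.Int.floordiv_eq_ediv_of_pos (by norm_num), ← pvG_seven,
    Int.mul_ediv_cancel_left _ (by norm_num)]

lemma pvG_succ' (m : Nat) : pvG (m + 1) = 8 * pvG m + 1 := by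
  have h1 := pvG_seven m
  have h2 := pvG_seven (m + 1)
  rw [pow_succ] at h2
  linarith

-- the first component of A's inner generator loop just appends the range
lemma pvInner_fst (xs : List Int) (acc : List Int) (n : Int) :
    (xs.foldl (fun p k => (p.1 ++ [k], p.2 + 1)) (acc, n)).1 = acc ++ xs := by
  rw [PySem.List.foldl_prod_mk (fun a (k : Int) => a ++ [k]) (fun c (_ : Int) => c + 1)]
  exact PySem.List.foldl_append_singleton xs acc

-- B's per-level block, expressed with pvG and the running shift S - 3*ℓ
def pvBody (begin end_ S : Int) (ℓ : Nat) : List Int :=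
  PySem.List.pyRange (pvG ℓ + (begin >>> (S - 3 * ℓ).toNat))
    (pvG ℓ + (end_ >>> (S - 3 * ℓ).toNat) + 1)

-- invariant of A's outer fold over the levels 0 .. m-1
lemma pvFold_inv (begin end_ S : Int) (m : Nat) :
    ((List.range m).map (fun (k : Nat) => (k : Int))).foldl
      (fun st (level : Int) =>
        let b := st.1 + (begin >>> st.2.1.toNat)
        let e := st.1 + (end_ >>> st.2.1.toNat)
        let n := e - b + 1
        let inner := (PySem.List.pyRange b (e + 1)).foldl
          (fun p k => (p.1 ++ [k], p.2 + 1)) (st.2.2, n)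
        (st.1 + ((1:Int) <<< ((level <<< (1:Nat)) + level).toNat), st.2.1 - 3, inner.1))
      (0, S, [])
    = (pvG m, S - 3 * m, (List.range m).flatMap (pvBody begin end_ S)) := by
  induction m with
  | zero => simp [pvG]
  | succ m ih =>
    rw [List.range_succ, List.map_append, List.foldl_append, ih]
    simp only [List.map_cons, List.map_nil, List.foldl_cons, List.foldl_nil]
    refine Prod.ext ?_ (Prod.ext ?_ ?_)
    · show pvG m + ((1:Int) <<< (((m:Int) <<< (1:Nat)) + m).toNat) = pvG (m + 1)
      have h1 : ((m:Int) <<< (1:Nat)) = (m:Int) * 2 ^ 1 := Int.shiftLeft_eq _ _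
      have h2 : ((m:Int) * 2 ^ 1 + m).toNat = 3 * m := by omega
      rw [h1, h2, Int.shiftLeft_eq]
      have h3 : ((2:Int)) ^ (3 * m) = 8 ^ m := by rw [pow_mul]; norm_num
      simp only [pvG]
      rw [h3]; ring
    · show S - 3 * (m:Int) - 3 = S - 3 * ((m:Nat) + 1 : Nat)
      push_cast; ring
    · rw [pvInner_fst, List.flatMap_append]
      simp only [List.flatMap_cons, List.flatMap_nil, List.append_nil]
      unfold pvBody
      simp only [← Int.shiftRight_natCast_right, Int.toNat_eq_max]

lemma pvA_eq (begin end_ n_levels min_shift : Int) :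
    region_to_bins begin end_ n_levels min_shift
    = (List.range (n_levels + 1).toNat).flatMap
        (pvBody begin end_ (min_shift + 3 * n_levels)) := by
  unfold region_to_bins
  have hS : min_shift + (n_levels <<< (1:Nat)) + n_levels = min_shift + 3 * n_levels := by
    rw [Int.shiftLeft_eq]; ring
  by_cases h : 0 ≤ n_levels + 1
  · have hcast : n_levels + 1 = ((n_levels + 1).toNat : Int) := by omega
    rw [hS, hcast, PySem.List.pyRange_zero_natCast, pvFold_inv]
    simp
    have hmax : (max (n_levels + 1) (0:Int)).toNat = (n_levels + 1).toNat := by omega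
    rw [hmax]
  · have h1 : PySem.List.pyRange 0 (n_levels + 1) = [] := by
      simp [PySem.List.pyRange]; omega
    have h2 : (n_levels + 1).toNat = 0 := by omega
    rw [h1, h2]; rfl

-- ----- B-side lemmas -----

-- B's parent step on the state
def pvStep : (Int × Int × List (List Int)) → (Int × Int × List (List Int)) :=
  fun st => ((st.1 - 1) >>> (3:Nat), (st.2.1 - 1) >>> (3:Nat),
    st.2.2 ++ [PySem.List.pyRange st.1 (st.2.1 + 1)])

-- a fold whose function ignores the list element is an iteration
lemma pvFoldl_const {α β : Type} (f : α → α) (l : List β) (init : α) :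
    l.foldl (fun st _ => f st) init = f^[l.length] init := by
  induction l generalizing init with
  | nil => rfl
  | cons x xs ih => simp [List.foldl_cons, ih, Function.iterate_succ_apply]

-- one parent step sends a level-(k+1) bin bound to the corresponding level-k bound
lemma pvParent (k : Nat) (x s : Int) (hs : 0 ≤ s) :
    (pvG (k + 1) + (x >>> s.toNat) - 1) >>> (3:Nat) = pvG k + (x >>> (s + 3).toNat) := by
  have ht : (s + 3).toNat = s.toNat + 3 := by omega
  rw [ht, Int.shiftRight_add, pvG_succ']
  have h1 : 8 * pvG k + 1 + (x >>> s.toNat) - 1 = 8 * pvG k + (x >>> s.toNat) := by ring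
  rw [h1]
  simp only [Int.shiftRight_eq_div_pow]
  omega

-- invariant of B's iteration: starting at level ℓ with shift s, m ≤ ℓ+1 steps append the
-- ranges of levels ℓ, ℓ-1, …, ℓ-m+1 (with shifts s, s+3, …)
lemma pvB_iter (x y : Int) : ∀ (m ℓ : Nat) (s : Int), 0 ≤ s → m ≤ ℓ + 1 →
    ∀ acc : List (List Int),
    (pvStep^[m] (pvG ℓ + (x >>> s.toNat), pvG ℓ + (y >>> s.toNat), acc)).2.2
    = acc ++ (List.range m).map (fun j =>
        PySem.List.pyRange (pvG (ℓ - j) + (x >>> (s + 3 * j).toNat))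
          (pvG (ℓ - j) + (y >>> (s + 3 * j).toNat) + 1)) := by
  intro m
  induction m with
  | zero => intro ℓ s _ _ acc; simp
  | succ m ih =>
    intro ℓ s hs hm acc
    rw [Function.iterate_succ_apply]
    cases ℓ with
    | zero =>
      have hm0 : m = 0 := by omega
      subst hm0
      simp [pvStep]
    | succ k =>
      have hstep : pvStep (pvG (k + 1) + (x >>> s.toNat), pvG (k + 1) + (y >>> s.toNat), acc)
          = (pvG k + (x >>> (s + 3).toNat), pvG k + (y >>> (s + 3).toNat),
             acc ++ [PySem.List.pyRange (pvG (k + 1) + (x >>> s.toNat))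
               (pvG (k + 1) + (y >>> s.toNat) + 1)]) := by
        simp only [pvStep, pvParent k x s hs, pvParent k y s hs]
      rw [hstep, ih k (s + 3) (by omega) (by omega)]
      rw [List.range_succ_eq_map, List.map_cons, List.map_map]
      simp only [List.append_assoc, List.singleton_append]
      congr 2
      · norm_num
      · apply List.map_congr_left
        intro j _
        have h1 : (k + 1) - (j + 1) = k - j := by omega
        have h2 : s + 3 * ((j:Nat) + 1 : Nat) = s + 3 + 3 * (j : Nat) := by push_cast; ring
        simp only [Function.comp, h1]
        rw [h2]

-- reversing a map over range flips the index
lemma pvRev_map_range {α : Type} (n : Nat) (f : Nat → α) :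
    ((List.range n).map f).reverse = (List.range n).map (fun i => f (n - 1 - i)) := by
  apply List.ext_getElem
  · simp
  · intro i h1 h2
    simp only [List.getElem_reverse, List.getElem_map, List.getElem_range,
      List.length_map, List.length_range] at *

lemma pvAlt_eq (begin end_ n_levels min_shift : Int)
    (hpre : Pre_region_to_bins begin end_ n_levels min_shift) :
    region_to_bins_alt begin end_ n_levels min_shift
    = (List.range (n_levels + 1).toNat).flatMap
        (pvBody begin end_ (min_shift + 3 * n_levels)) := by
  by_cases h : n_levels < 0
  · simp only [region_to_bins_alt, if_pos h]
    have h2 : (n_levels + 1).toNat = 0 := by omega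
    rw [h2]; rfl
  · have hms : 0 ≤ min_shift := by
      rcases hpre with h' | h'
      · omega
      · exact h'
    simp only [region_to_bins_alt, if_neg h]
    have hfun : (fun (st : Int × Int × List (List Int)) (_ : Int) =>
        ((st.1 - 1) >>> (3:Nat), (st.2.1 - 1) >>> (3:Nat),
          st.2.2 ++ [PySem.List.pyRange st.1 (st.2.1 + 1)]))
        = (fun st _ => pvStep st) := rfl
    have hcast : n_levels + 1 = ((n_levels.toNat + 1 : Nat) : Int) := by omega
    rw [hcast, PySem.List.pyRange_zero_natCast, hfun,
      pvFoldl_const pvStep _ _, List.length_map, List.length_range,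
      ← pvG_eq_floordiv n_levels.toNat,
      pvB_iter begin end_ (n_levels.toNat + 1) n_levels.toNat min_shift hms (le_refl _) [],
      List.nil_append, pvRev_map_range, List.flatMap_map]
    rw [Int.toNat_natCast]
    apply List.flatMap_congr
    intro i hi
    rw [List.mem_range] at hi
    have hi' : i ≤ n_levels.toNat := by omega
    simp only [id]
    have h1 : n_levels.toNat + 1 - 1 - i = n_levels.toNat - i := by omega
    have h2 : n_levels.toNat - (n_levels.toNat - i) = i := by omega
    have h3 : min_shift + 3 * ((n_levels.toNat - i : Nat) : Int)
        = min_shift + 3 * n_levels - 3 * (i : Nat) := by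
      have : ((n_levels.toNat - i : Nat) : Int) = n_levels - i := by omega
      rw [this]; ring
    rw [h1, h2]
    unfold pvBody
    rw [h3]

-- ===== VERDICT (by name: the statement is the Claim_ definition above) =====
theorem region_to_bins_spec : Claim_equal_region_to_bins := by
  intro begin end_ n_levels min_shift _ hpre
  unfold Spec_region_to_bins
  rw [pvA_eq, pvAlt_eq _ _ _ _ hpre]
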